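-- pv_equiv track=rewrite | github.com/GH-Lim/AlgorithmPractice | problems/test9/3.py | solution
-- ===== SOURCE A (Python) =====
-- def solution(k, score):
--     answer = set()
--     n = len(score)
--     a = [0] * n
--     cnt = {}
--     for i in range(1, n):
--         a[i] = score[i - 1] - score[i]
--         if a[i] not in cnt:
--             cnt[a[i]] = 0
--         cnt[a[i]] += 1
--     for i in range(1, n):
--         if cnt[a[i]] >= k:
--             answer.add(i)
--             answer.add(i - 1)
--     return n - len(answer)
-- ===== SOURCE B (Python) =====
-- def solution(k, score):
--     n = len(score)
--     diffs = []
--     cnt = {}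
--     for i in range(1, n):
--         d = score[i - 1] - score[i]
--         diffs.append(d)
--         cnt[d] = cnt.get(d, 0) + 1
--     # The covered indices are the union of the intervals {i-1, i} over frequent
--     # edges i; the size of that union is (#frequent edges) + (#maximal runs of
--     # consecutive frequent edges), computed in one streaming pass with no set.
--     covered = 0
--     runs = 0
--     prev = False
--     for d in diffs:
--         f = cnt[d] >= k
--         if f:
--             covered += 1
--             if not prev:
--                 runs += 1
--         prev = f
--     return n - covered - runs
-- ===== Notes on version B (the rewrite author's own statement) =====
-- stated objective: alternative
-- what changed: A marks covered endpoint indices in a set and subtracts its size; B never materialises any index set: it views the covered indices as a union of unit intervals over frequent edges and computes the union's size by run-length encoding (covered = #frequent edges + #maximal runs of consecutive frequent edges) in one streaming pass with a single carried boolean.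
import Mathlib
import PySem

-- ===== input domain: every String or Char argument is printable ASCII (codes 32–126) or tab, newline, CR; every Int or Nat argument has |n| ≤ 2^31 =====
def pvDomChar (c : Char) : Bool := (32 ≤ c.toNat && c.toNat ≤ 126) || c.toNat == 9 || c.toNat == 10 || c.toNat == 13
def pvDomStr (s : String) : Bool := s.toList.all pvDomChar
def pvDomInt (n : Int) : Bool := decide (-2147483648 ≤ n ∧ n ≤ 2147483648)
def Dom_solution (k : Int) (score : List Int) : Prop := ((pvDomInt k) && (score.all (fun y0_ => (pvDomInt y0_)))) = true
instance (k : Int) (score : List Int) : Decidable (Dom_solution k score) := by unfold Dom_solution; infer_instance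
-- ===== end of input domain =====

-- B replaces A's explicit covered-index set by a run-length count of the interval union (covered = #frequent edges + #runs), one streaming pass and no set; objective: alternative.


-- ===== PORT A =====
def solution (k : Int) (score : List Int) : Int :=
  let answer : PySem.Set Int := PySem.Set.empty
  let n : Int := PySem.List.len score
  let a : List Int := List.replicate n.toNat 0
  let cnt : PySem.Dict Int Int := PySem.Dict.empty
  let st :=
    (PySem.List.pyRange 1 n 1).foldl (fun st i =>
      let ai := PySem.List.pyGetD score (i - 1) 0 - PySem.List.pyGetD score i 0
      let a' := PySem.List.pySetD st.1 i ai
      let cnt' := if st.2.contains ai then st.2 else st.2.insert ai 0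
      (a', cnt'.insert ai (cnt'.getD ai 0 + 1))) (a, cnt)
  let answer :=
    (PySem.List.pyRange 1 n 1).foldl (fun ans i =>
      if k ≤ (st.2).getD (PySem.List.pyGetD st.1 i 0) 0 then
        PySem.Set.add (PySem.Set.add ans i) (i - 1)
      else ans) answer
  n - PySem.List.len answer

-- ===== PORT B =====
def solution_alt (k : Int) (score : List Int) : Int :=
  let n : Int := PySem.List.len score
  let st1 :=
    (PySem.List.pyRange 1 n 1).foldl (fun s i =>
      let d := PySem.List.pyGetD score (i - 1) 0 - PySem.List.pyGetD score i 0
      (s.1 ++ [d], s.2.insert d (s.2.getD d 0 + 1)))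
      (([] : List Int), (PySem.Dict.empty : PySem.Dict Int Int))
  let diffs := st1.1
  let cnt := st1.2
  let st2 :=
    diffs.foldl (fun (s : Int × Int × Bool) d =>
      let f := decide (k ≤ cnt.getD d 0)
      (s.1 + (if f then 1 else 0),
       s.2.1 + (if f && !s.2.2 then 1 else 0),
       f))
      (0, 0, false)
  n - st2.1 - st2.2.1

-- ===== PRECONDITION & SPEC =====
def Spec_solution (k : Int) (score : List Int) (out : Int) : Prop := out = solution_alt k score
instance (k : Int) (score : List Int) (out : Int) : Decidable (Spec_solution k score out) := by unfold Spec_solution; infer_instance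

-- ===== CLAIM (what is proved, stated in full; the proofs are below) =====
def Claim_equal_solution : Prop := ∀ (k : Int) (score : List Int), Dom_solution k score → Spec_solution k score (solution k score)

-- ===== LEMMAS AND PROOFS =====

-- A's answer set after processing edges 1..u-1
def pvSA (Q : Int → Prop) [DecidablePred Q] (u : Int) : PySem.Set Int :=
  (PySem.List.pyRange 1 u 1).foldl
    (fun ans i => if Q i then PySem.Set.add (PySem.Set.add ans i) (i - 1) else ans)
    PySem.Set.empty

-- B's streaming state (covered, runs, prev) after processing edges 1..u-1
def pvStB (Q : Int → Prop) [DecidablePred Q] (u : Int) : Int × Int × Bool :=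
  (PySem.List.pyRange 1 u 1).foldl
    (fun (s : Int × Int × Bool) i =>
      (s.1 + (if decide (Q i) then 1 else 0),
       s.2.1 + (if decide (Q i) && !s.2.2 then 1 else 0),
       decide (Q i)))
    (0, 0, false)

lemma cnt_step_eq (c : PySem.Dict Int Int) (x : Int) :
    (if c.contains x then c else c.insert x 0).insert x
      ((if c.contains x then c else c.insert x 0).getD x 0 + 1)
      = c.insert x (c.getD x 0 + 1) := by
  by_cases h : c.contains x
  · simp [h]
  · have h' : c.contains x = false := by simpa using h
    simp [h', PySem.Dict.getD_insert_self, PySem.Dict.insert_insert_self,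
      PySem.Dict.getD_of_not_contains c 0 h']

theorem foldSet_getD (f : Int → Int) (m : Nat) (a0 : List Int) :
    ((PySem.List.pyRange 1 (m : Int) 1).foldl (fun a i => PySem.List.pySetD a i (f i)) a0).length = a0.length ∧
    ∀ j : Nat, ((PySem.List.pyRange 1 (m : Int) 1).foldl (fun a i => PySem.List.pySetD a i (f i)) a0).getD j 0 =
      if 1 ≤ j ∧ j < m ∧ j < a0.length then f j else a0.getD j 0 := by
  induction m with
  | zero =>
      rw [PySem.List.pyRange_one_eq_nil (by norm_num)]
      simp
  | succ m ih =>
      by_cases hm : m = 0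
      · subst hm
        rw [Nat.cast_one, PySem.List.pyRange_one_eq_nil le_rfl]
        refine ⟨rfl, fun j => ?_⟩
        rw [if_neg (by omega)]
        simp
      · have h1 : (1 : Int) ≤ (m : Int) := by omega
        rw [show ((m + 1 : Nat) : Int) = (m : Int) + 1 by push_cast; ring,
            PySem.List.pyRange_one_succ_right h1, List.foldl_append]
        simp only [List.foldl_cons, List.foldl_nil]
        obtain ⟨hlen, hget⟩ := ih
        rw [PySem.List.pySetD_natCast]
        refine ⟨by simp [hlen], fun j => ?_⟩
        rw [List.getD_eq_getElem?_getD, List.getElem?_set, hlen]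
        by_cases hj : m = j
        · obtain rfl := hj
          by_cases hjl : m < a0.length
          · rw [if_pos rfl, if_pos hjl, Option.getD_some, if_pos ⟨by omega, by omega, hjl⟩]
          · rw [if_pos rfl, if_neg hjl, Option.getD_none, if_neg (by omega),
                List.getD_eq_getElem?_getD, List.getElem?_eq_none (by omega), Option.getD_none]
        · rw [if_neg hj, ← List.getD_eq_getElem?_getD, hget]
          by_cases hc : 1 ≤ j ∧ j < m ∧ j < a0.length
          · rw [if_pos hc, if_pos (by omega)]
          · rw [if_neg hc, if_neg (by omega)]

lemma mem_fold_answer (l : List Int) (P : Int → Prop) [DecidablePred P] (s : PySem.Set Int) (x : Int) :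
    x ∈ l.foldl (fun ans i => if P i then PySem.Set.add (PySem.Set.add ans i) (i - 1) else ans) s ↔
      x ∈ s ∨ ∃ i ∈ l, P i ∧ (x = i ∨ x = i - 1) := by
  induction l generalizing s with
  | nil => simp
  | cons hd tl ih =>
      simp only [List.foldl_cons, ih, List.mem_cons]
      by_cases h : P hd
      · simp only [h, if_true, PySem.Set.mem_add]
        constructor
        · rintro (((hx | hx) | hx) | ⟨i, hi, hPi, hxi⟩)
          · exact Or.inl hx
          · exact Or.inr ⟨hd, Or.inl rfl, h, Or.inl hx⟩
          · exact Or.inr ⟨hd, Or.inl rfl, h, Or.inr hx⟩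
          · exact Or.inr ⟨i, Or.inr hi, hPi, hxi⟩
        · rintro (hx | ⟨i, (rfl | hi), hPi, hxi⟩)
          · exact Or.inl (Or.inl (Or.inl hx))
          · rcases hxi with rfl | rfl
            · exact Or.inl (Or.inl (Or.inr rfl))
            · exact Or.inl (Or.inr rfl)
          · exact Or.inr ⟨i, hi, hPi, hxi⟩
      · simp only [h, if_false]
        constructor
        · rintro (hx | ⟨i, hi, hPi, hxi⟩)
          · exact Or.inl hx
          · exact Or.inr ⟨i, Or.inr hi, hPi, hxi⟩
        · rintro (hx | ⟨i, (rfl | hi), hPi, hxi⟩)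
          · exact Or.inl hx
          · exact absurd hPi h
          · exact Or.inr ⟨i, hi, hPi, hxi⟩

lemma length_set_add (s : PySem.Set Int) (x : Int) :
    (PySem.Set.add s x).length = if x ∈ s then s.length else s.length + 1 := by
  by_cases h : x ∈ s
  · simp [PySem.Set.add, h]
  · simp [PySem.Set.add, h]

lemma mem_pvSA (Q : Int → Prop) [DecidablePred Q] (u : Int) (x : Int) :
    x ∈ pvSA Q u ↔ ∃ i, (1 ≤ i ∧ i < u) ∧ Q i ∧ (x = i ∨ x = i - 1) := by
  unfold pvSA
  rw [mem_fold_answer]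
  simp [PySem.Set.empty, PySem.List.mem_pyRange_one]

-- main invariant: |A's set| = covered + runs, and prev = (last edge frequent)
lemma pvMain (Q : Int → Prop) [DecidablePred Q] (u : Nat) :
    ((pvSA Q (u : Int)).length : Int) = (pvStB Q (u : Int)).1 + (pvStB Q (u : Int)).2.1 ∧
    (pvStB Q (u : Int)).2.2 = decide (2 ≤ u ∧ Q ((u : Int) - 1)) := by
  induction u with
  | zero =>
      unfold pvSA pvStB
      rw [PySem.List.pyRange_one_eq_nil (by norm_num)]
      simp [PySem.Set.empty]
  | succ u ih =>
      by_cases hu : u = 0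
      · subst hu
        unfold pvSA pvStB
        rw [Nat.cast_one, PySem.List.pyRange_one_eq_nil le_rfl]
        simp [PySem.Set.empty]
      · have h1 : (1 : Int) ≤ (u : Int) := by omega
        have hsplit : PySem.List.pyRange 1 ((u + 1 : Nat) : Int) 1
            = PySem.List.pyRange 1 (u : Int) 1 ++ [(u : Int)] := by
          rw [show ((u + 1 : Nat) : Int) = (u : Int) + 1 by push_cast; ring,
              PySem.List.pyRange_one_succ_right h1]
        obtain ⟨ihlen, ihprev⟩ := ih
        have hSA : pvSA Q ((u + 1 : Nat) : Int)
            = if Q (u : Int) then PySem.Set.add (PySem.Set.add (pvSA Q (u : Int)) (u : Int)) ((u : Int) - 1)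
              else pvSA Q (u : Int) := by
          unfold pvSA
          rw [hsplit, List.foldl_append]
          simp
        have hStB : pvStB Q ((u + 1 : Nat) : Int)
            = ((pvStB Q (u : Int)).1 + (if decide (Q (u : Int)) then 1 else 0),
               (pvStB Q (u : Int)).2.1 + (if decide (Q (u : Int)) && !(pvStB Q (u : Int)).2.2 then 1 else 0),
               decide (Q (u : Int))) := by
          unfold pvStB
          rw [hsplit, List.foldl_append]
          simp
        have humem : ((u : Int) ∈ pvSA Q (u : Int)) = False := by
          simp only [mem_pvSA, eq_iff_iff, iff_false]
          rintro ⟨i, ⟨hi1, hi2⟩, _, (rfl | h)⟩ <;> omega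
        have hprevmem : (((u : Int) - 1) ∈ pvSA Q (u : Int)) ↔ (2 ≤ u ∧ Q ((u : Int) - 1)) := by
          simp only [mem_pvSA]
          constructor
          · rintro ⟨i, ⟨hi1, hi2⟩, hQ, (h | h)⟩
            · exact ⟨by omega, h ▸ hQ⟩
            · omega
          · rintro ⟨h2, hQ⟩
            exact ⟨(u : Int) - 1, ⟨by omega, by omega⟩, hQ, Or.inl rfl⟩
        by_cases hQ : Q (u : Int)
        · have hprev : ((u : Int) - 1) ∈ PySem.Set.add (pvSA Q (u : Int)) (u : Int)
              ↔ (2 ≤ u ∧ Q ((u : Int) - 1)) := by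
            rw [PySem.Set.mem_add, hprevmem]
            constructor
            · rintro (h | h)
              · exact h
              · omega
            · exact Or.inl
          constructor
          · rw [hSA, if_pos hQ, hStB]
            simp only
            rw [length_set_add, length_set_add]
            rw [eq_iff_iff] at humem
            rw [if_neg (humem.mp)]
            by_cases hp : 2 ≤ u ∧ Q ((u : Int) - 1)
            · rw [if_pos (hprev.mpr hp)]
              have : (pvStB Q (u : Int)).2.2 = true := by rw [ihprev]; simp [hp.1, hp.2]
              rw [this]
              simp only [hQ, decide_true, Bool.not_true, Bool.and_false, if_true]
              push_cast
              omega
            · rw [if_neg (fun h => hp (hprev.mp h))]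
              have : (pvStB Q (u : Int)).2.2 = false := by
                rw [ihprev]; simp only [decide_eq_false_iff_not]; exact hp
              rw [this]
              simp only [hQ, decide_true, Bool.not_false, Bool.and_true, if_true]
              push_cast
              omega
          · rw [hStB]
            simp only
            rw [show ((u + 1 : Nat) : Int) - 1 = (u : Int) by push_cast; ring]
            simp [hQ, show 2 ≤ u + 1 by omega]
        · constructor
          · rw [hSA, if_neg hQ, hStB, ihlen]
            have hq' : decide (Q (u : Int)) = false := by simp [hQ]
            simp [hq']
          · rw [hStB]
            simp only
            rw [show ((u + 1 : Nat) : Int) - 1 = (u : Int) by push_cast; ring]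
            simp [hQ]

lemma foldl_append_singleton (g : Int → Int) (xs : List Int) (l : List Int) :
    xs.foldl (fun l x => l ++ [g x]) l = l ++ xs.map g := by
  induction xs generalizing l with
  | nil => simp
  | cons hd tl ih => simp [ih]

theorem solution_eq (k : Int) (score : List Int) : solution k score = solution_alt k score := by
  simp only [solution, solution_alt, PySem.List.len_eq]
  -- split A's first fold into the array fold and the counter fold
  have hsplitA := PySem.List.foldl_prod_mk
      (fun a i => PySem.List.pySetD a i (PySem.List.pyGetD score (i - 1) 0 - PySem.List.pyGetD score i 0))
      (fun (c : PySem.Dict Int Int) i =>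
        (if c.contains (PySem.List.pyGetD score (i - 1) 0 - PySem.List.pyGetD score i 0) then c
         else c.insert (PySem.List.pyGetD score (i - 1) 0 - PySem.List.pyGetD score i 0) 0).insert
          (PySem.List.pyGetD score (i - 1) 0 - PySem.List.pyGetD score i 0)
          ((if c.contains (PySem.List.pyGetD score (i - 1) 0 - PySem.List.pyGetD score i 0) then c
            else c.insert (PySem.List.pyGetD score (i - 1) 0 - PySem.List.pyGetD score i 0) 0).getD
            (PySem.List.pyGetD score (i - 1) 0 - PySem.List.pyGetD score i 0) 0 + 1))
      (PySem.List.pyRange 1 (score.length : Int) 1)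
      (List.replicate ((score.length : Int)).toNat 0) PySem.Dict.empty
  simp only [hsplitA]
  -- split B's first fold into the diffs fold and the counter fold
  have hsplitB := PySem.List.foldl_prod_mk
      (fun (l : List Int) i => l ++ [PySem.List.pyGetD score (i - 1) 0 - PySem.List.pyGetD score i 0])
      (fun (c : PySem.Dict Int Int) i =>
        c.insert (PySem.List.pyGetD score (i - 1) 0 - PySem.List.pyGetD score i 0)
          (c.getD (PySem.List.pyGetD score (i - 1) 0 - PySem.List.pyGetD score i 0) 0 + 1))
      (PySem.List.pyRange 1 (score.length : Int) 1)
      ([] : List Int) PySem.Dict.empty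
  simp only [hsplitB]
  -- A's counter equals B's counter
  have hcntEq : List.foldl
      (fun (c : PySem.Dict Int Int) i =>
        (if c.contains (PySem.List.pyGetD score (i - 1) 0 - PySem.List.pyGetD score i 0) then c
         else c.insert (PySem.List.pyGetD score (i - 1) 0 - PySem.List.pyGetD score i 0) 0).insert
          (PySem.List.pyGetD score (i - 1) 0 - PySem.List.pyGetD score i 0)
          ((if c.contains (PySem.List.pyGetD score (i - 1) 0 - PySem.List.pyGetD score i 0) then c
            else c.insert (PySem.List.pyGetD score (i - 1) 0 - PySem.List.pyGetD score i 0) 0).getD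
            (PySem.List.pyGetD score (i - 1) 0 - PySem.List.pyGetD score i 0) 0 + 1))
      PySem.Dict.empty (PySem.List.pyRange 1 (score.length : Int) 1)
      = List.foldl
          (fun (c : PySem.Dict Int Int) i =>
            c.insert (PySem.List.pyGetD score (i - 1) 0 - PySem.List.pyGetD score i 0)
              (c.getD (PySem.List.pyGetD score (i - 1) 0 - PySem.List.pyGetD score i 0) 0 + 1))
          PySem.Dict.empty (PySem.List.pyRange 1 (score.length : Int) 1) :=
    PySem.List.foldl_congr_mem _ _ _ _
      (fun acc x _ => cnt_step_eq acc (PySem.List.pyGetD score (x - 1) 0 - PySem.List.pyGetD score x 0))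
  simp only [hcntEq]
  set cnt := List.foldl
      (fun (c : PySem.Dict Int Int) i =>
        c.insert (PySem.List.pyGetD score (i - 1) 0 - PySem.List.pyGetD score i 0)
          (c.getD (PySem.List.pyGetD score (i - 1) 0 - PySem.List.pyGetD score i 0) 0 + 1))
      PySem.Dict.empty (PySem.List.pyRange 1 (score.length : Int) 1) with hcnt
  -- the padded array delivers the diff value at every edge index
  have haF : ∀ i ∈ PySem.List.pyRange 1 (score.length : Int) 1,
      PySem.List.pyGetD
        (List.foldl
          (fun a i => PySem.List.pySetD a i (PySem.List.pyGetD score (i - 1) 0 - PySem.List.pyGetD score i 0))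
          (List.replicate ((score.length : Int)).toNat 0) (PySem.List.pyRange 1 (score.length : Int) 1))
        i 0 = PySem.List.pyGetD score (i - 1) 0 - PySem.List.pyGetD score i 0 := by
    intro i hi
    obtain ⟨h1, h2⟩ := PySem.List.mem_pyRange_one.mp hi
    obtain ⟨hlen, hget⟩ := foldSet_getD
      (fun i => PySem.List.pyGetD score (i - 1) 0 - PySem.List.pyGetD score i 0)
      score.length (List.replicate ((score.length : Int)).toNat 0)
    have hic : i = ((i.toNat : Nat) : Int) := by omega
    rw [hic, PySem.List.pyGetD_natCast, hget i.toNat,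
        if_pos ⟨by omega, by omega, by simp; omega⟩]
  -- rewrite A's answer fold into pvSA
  have hansEq : List.foldl
      (fun ans i =>
        if k ≤ cnt.getD (PySem.List.pyGetD
            (List.foldl
              (fun a i => PySem.List.pySetD a i (PySem.List.pyGetD score (i - 1) 0 - PySem.List.pyGetD score i 0))
              (List.replicate ((score.length : Int)).toNat 0) (PySem.List.pyRange 1 (score.length : Int) 1)) i 0) 0 then
          PySem.Set.add (PySem.Set.add ans i) (i - 1)
        else ans)
      (PySem.Set.empty) (PySem.List.pyRange 1 (score.length : Int) 1)
      = pvSA (fun i => k ≤ cnt.getD (PySem.List.pyGetD score (i - 1) 0 - PySem.List.pyGetD score i 0) 0)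
          (score.length : Int) := by
    unfold pvSA
    exact PySem.List.foldl_congr_mem _ _ _ _ (fun acc x hx => by rw [haF x hx])
  -- B's diffs list is the mapped range, and its second fold is pvStB
  have hdiffs : List.foldl
      (fun (l : List Int) i => l ++ [PySem.List.pyGetD score (i - 1) 0 - PySem.List.pyGetD score i 0]) []
      (PySem.List.pyRange 1 (score.length : Int) 1)
      = (PySem.List.pyRange 1 (score.length : Int) 1).map
          (fun i => PySem.List.pyGetD score (i - 1) 0 - PySem.List.pyGetD score i 0) := by
    rw [foldl_append_singleton]; simp
  have hstB : ((PySem.List.pyRange 1 (score.length : Int) 1).map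
        (fun i => PySem.List.pyGetD score (i - 1) 0 - PySem.List.pyGetD score i 0)).foldl
      (fun (s : Int × Int × Bool) d =>
        (s.1 + (if decide (k ≤ cnt.getD d 0) then 1 else 0),
         s.2.1 + (if decide (k ≤ cnt.getD d 0) && !s.2.2 then 1 else 0),
         decide (k ≤ cnt.getD d 0)))
      (0, 0, false)
      = pvStB (fun i => k ≤ cnt.getD (PySem.List.pyGetD score (i - 1) 0 - PySem.List.pyGetD score i 0) 0)
          (score.length : Int) := by
    unfold pvStB
    rw [List.foldl_map]
  simp only [hansEq, hdiffs, hstB]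
  obtain ⟨hlen, _⟩ := pvMain
    (fun i => k ≤ cnt.getD (PySem.List.pyGetD score (i - 1) 0 - PySem.List.pyGetD score i 0) 0) score.length
  omega

-- ===== VERDICT (by name: the statement is the Claim_ definition above) =====
theorem solution_spec : Claim_equal_solution := by
  intro k score _
  show solution k score = solution_alt k score
  exact solution_eq k score
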